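-- pv_equiv track=rewrite | github.com/hartmaj2/24-25-scratch | Resources/AstroPi_Code/pixilart_to_code.py | get_col_to_var_dict
-- ===== SOURCE A (Python) =====
-- def get_col_to_var_dict(pixels : list[tuple]) -> dict[tuple,str]:
--     current_var = ord('a')
--     col_to_var = {}
--     for pixel in pixels:
--         if pixel not in col_to_var:
--             col_to_var[pixel] = chr(current_var)
--             current_var += 1
--     return col_to_var
-- ===== SOURCE B (Python) =====
-- def get_col_to_var_dict(pixels : list[tuple]) -> dict[tuple,str]:
--     # Backward pass with unconditional overwrite records each color's
--     # first-occurrence index; then sort the distinct colors by that index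
--     # and assign letters by rank.
--     first = {}
--     for i, p in reversed(list(enumerate(pixels))):
--         first[p] = i
--     order = sorted(first, key=first.get)
--     return {p: chr(ord('a') + k) for k, p in enumerate(order)}
-- ===== Notes on version B (the rewrite author's own statement) =====
-- stated objective: alternative
-- what changed: B replaces A's single forward pass with membership test and running counter by a different strategy: a backward pass with unconditional dict overwrite that records each color's first-occurrence index, then a sort of the distinct colors by that index, then lettering by rank.
import Mathlib
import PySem

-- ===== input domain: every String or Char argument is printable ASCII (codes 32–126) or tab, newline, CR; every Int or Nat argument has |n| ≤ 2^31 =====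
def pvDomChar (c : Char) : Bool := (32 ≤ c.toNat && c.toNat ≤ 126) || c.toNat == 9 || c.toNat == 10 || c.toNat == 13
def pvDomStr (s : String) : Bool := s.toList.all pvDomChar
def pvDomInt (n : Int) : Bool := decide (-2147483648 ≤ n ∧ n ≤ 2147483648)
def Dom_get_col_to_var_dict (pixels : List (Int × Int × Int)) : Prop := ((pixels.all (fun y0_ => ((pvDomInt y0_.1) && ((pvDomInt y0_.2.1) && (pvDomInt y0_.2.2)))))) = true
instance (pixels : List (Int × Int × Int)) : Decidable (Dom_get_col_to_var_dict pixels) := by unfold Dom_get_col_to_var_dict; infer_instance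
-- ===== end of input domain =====

-- B records first-occurrence indices by a backward overwrite pass, sorts the distinct colors by
-- that index and letters them by rank, instead of A's forward membership-test-and-counter loop;
-- objective: alternative (same result, different algorithm).

-- ===== PORT A =====
-- A's dict[tuple,str] is the flattened association list (insertion order); the loop carries
-- (current_var, col_to_var) and appends a new entry when the pixel key is not yet present.
def get_col_to_var_dict (pixels : List (Int × Int × Int)) : List (Int × Int × Int × String) :=
  (pixels.foldl
    (fun (st : Nat × List (Int × Int × Int × String)) px =>
      if st.2.any (fun e => (e.1, e.2.1, e.2.2.1) == px) then st
      else (st.1 + 1, st.2 ++ [(px.1, px.2.1, px.2.2, String.ofList [Char.ofNat st.1])]))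
    (97, [])).2

-- ===== PORT B =====
-- Source B step for step: `for i, p in reversed(list(enumerate(pixels))): first[p] = i` is the fold
-- over (enumerate pixels).reverse with Dict.insert; `sorted(first, key=first.get)` is
-- PySem.List.sorted over the dict's keys (every key is present, so first.get is ported as getD 0);
-- the final comprehension maps over enumerate of the sorted keys.
def get_col_to_var_dict_alt (pixels : List (Int × Int × Int)) : List (Int × Int × Int × String) :=
  let first : PySem.Dict (Int × Int × Int) Int :=
    ((PySem.List.enumerate pixels 0).reverse).foldl (fun d ip => d.insert ip.2 ip.1) PySem.Dict.empty
  let order := PySem.List.sorted first.keys (fun p => first.getD p 0) false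
  (PySem.List.enumerate order 0).map
    (fun kp => (kp.2.1, kp.2.2.1, kp.2.2.2, String.ofList [Char.ofNat (97 + kp.1).toNat]))

-- ===== PRECONDITION & SPEC =====
def Spec_get_col_to_var_dict (pixels : List (Int × Int × Int)) (out : List (Int × Int × Int × String)) : Prop := out = get_col_to_var_dict_alt pixels
instance (pixels : List (Int × Int × Int)) (out : List (Int × Int × Int × String)) : Decidable (Spec_get_col_to_var_dict pixels out) := by unfold Spec_get_col_to_var_dict; infer_instance

-- ===== CLAIM (what is proved, stated in full; the proofs are below) =====
def Claim_equal_get_col_to_var_dict : Prop := ∀ (pixels : List (Int × Int × Int)), Dom_get_col_to_var_dict pixels → Spec_get_col_to_var_dict pixels (get_col_to_var_dict pixels)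

-- ===== LEMMAS AND PROOFS =====

-- the ordered list of pixels of `ps` whose key is not in `seen`, first occurrences only
def pvFresh (seen : List (Int × Int × Int)) : List (Int × Int × Int) → List (Int × Int × Int)
  | [] => []
  | p :: ps => if seen.contains p then pvFresh seen ps else p :: pvFresh (seen ++ [p]) ps

-- assign letters c, c+1, … to a list of keys
def pvLettered (c : Nat) : List (Int × Int × Int) → List (Int × Int × Int × String)
  | [] => []
  | p :: ps => (p.1, p.2.1, p.2.2, String.ofList [Char.ofNat c]) :: pvLettered (c + 1) ps

def pvKeys (acc : List (Int × Int × Int × String)) : List (Int × Int × Int) :=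
  acc.map (fun e => (e.1, e.2.1, e.2.2.1))

lemma pvMemTest (acc : List (Int × Int × Int × String)) (px : Int × Int × Int) :
    acc.any (fun e => (e.1, e.2.1, e.2.2.1) == px) = (pvKeys acc).contains px := by
  rw [Bool.eq_iff_iff]
  simp only [List.any_eq_true, beq_iff_eq, pvKeys, List.contains_iff_mem, List.mem_map]

-- A's loop produces the first-occurrence keys, lettered from the running counter
lemma pvLoop (pixels : List (Int × Int × Int)) :
    ∀ (acc : List (Int × Int × Int × String)) (c : Nat),
    (pixels.foldl
      (fun (st : Nat × List (Int × Int × Int × String)) px =>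
        if st.2.any (fun e => (e.1, e.2.1, e.2.2.1) == px) then st
        else (st.1 + 1, st.2 ++ [(px.1, px.2.1, px.2.2, String.ofList [Char.ofNat st.1])]))
      (c, acc)).2 = acc ++ pvLettered c (pvFresh (pvKeys acc) pixels) := by
  induction pixels with
  | nil => intro acc c; simp [pvFresh, pvLettered]
  | cons p ps ih =>
    intro acc c
    have hA := pvMemTest acc p
    rw [List.foldl_cons]
    simp only [pvFresh]
    by_cases h : (pvKeys acc).contains p
    · simp only [hA, h, if_true]
      exact ih acc c
    · simp only [hA, h, if_false, Bool.false_eq_true]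
      rw [ih (acc ++ [(p.1, p.2.1, p.2.2, String.ofList [Char.ofNat c])]) (c + 1)]
      have hk : pvKeys (acc ++ [(p.1, p.2.1, p.2.2, String.ofList [Char.ofNat c])])
          = pvKeys acc ++ [p] := by simp [pvKeys]
      rw [hk]
      simp [pvLettered]

-- membership in pvFresh: exactly the elements of ps not already seen
lemma pvFreshMem (ps : List (Int × Int × Int)) :
    ∀ (seen : List (Int × Int × Int)) (a : Int × Int × Int),
    a ∈ pvFresh seen ps → a ∈ ps ∧ a ∉ seen := by
  induction ps with
  | nil => intro seen a h; simp [pvFresh] at h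
  | cons p ps ih =>
    intro seen a h
    simp only [pvFresh] at h
    by_cases hp : seen.contains p
    · simp only [hp, if_true] at h
      rcases ih seen a h with ⟨h1, h2⟩
      exact ⟨List.mem_cons_of_mem _ h1, h2⟩
    · simp only [hp, if_false, Bool.false_eq_true, List.mem_cons] at h
      rcases h with rfl | h
      · exact ⟨List.mem_cons_self, by simpa using hp⟩
      · rcases ih (seen ++ [p]) a h with ⟨h1, h2⟩
        simp only [List.mem_append, List.mem_singleton, not_or] at h2
        exact ⟨List.mem_cons_of_mem _ h1, h2.1⟩

lemma pvFreshComplete (ps : List (Int × Int × Int)) :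
    ∀ (seen : List (Int × Int × Int)) (a : Int × Int × Int),
    a ∈ ps → a ∉ seen → a ∈ pvFresh seen ps := by
  induction ps with
  | nil => intro seen a h; simp at h
  | cons p ps ih =>
    intro seen a ha hs
    simp only [pvFresh]
    rcases List.mem_cons.mp ha with rfl | ha'
    · have hns : ¬ seen.contains a = true := by simpa using hs
      rw [if_neg hns]
      exact List.mem_cons_self
    · by_cases hp : seen.contains p
      · simp only [hp, if_true]; exact ih seen a ha' hs
      · simp only [hp, if_false, Bool.false_eq_true]
        by_cases hap : a = p
        · subst hap; exact List.mem_cons_self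
        · exact List.mem_cons_of_mem _ (ih (seen ++ [p]) a ha' (by simp [hs, hap]))

lemma pvFreshNodup (ps : List (Int × Int × Int)) :
    ∀ (seen : List (Int × Int × Int)), (pvFresh seen ps).Nodup := by
  induction ps with
  | nil => intro seen; simp [pvFresh]
  | cons p ps ih =>
    intro seen
    simp only [pvFresh]
    by_cases hp : seen.contains p
    · simp only [hp, if_true]; exact ih seen
    · simp only [hp, if_false, Bool.false_eq_true]
      refine List.nodup_cons.mpr ⟨fun hmem => ?_, ih (seen ++ [p])⟩
      have := (pvFreshMem ps (seen ++ [p]) p hmem).2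
      simp at this

-- pvFresh lists first occurrences in order of strictly increasing first index
lemma pvFreshPairwise (ps : List (Int × Int × Int)) :
    ∀ (seen : List (Int × Int × Int)),
    (pvFresh seen ps).Pairwise (fun a b => ps.idxOf a < ps.idxOf b) := by
  induction ps with
  | nil => intro seen; simp [pvFresh]
  | cons p ps ih =>
    intro seen
    simp only [pvFresh]
    by_cases hp : seen.contains p
    · simp only [hp, if_true]
      refine List.Pairwise.imp_of_mem (fun {a b} ha hb hR => ?_) (ih seen)
      have hane : a ≠ p := fun h => (pvFreshMem ps seen a ha).2 (h ▸ (by simpa using hp))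
      have hbne : b ≠ p := fun h => (pvFreshMem ps seen b hb).2 (h ▸ (by simpa using hp))
      rw [List.idxOf_cons_ne ps hane.symm, List.idxOf_cons_ne ps hbne.symm]
      omega
    · simp only [hp, if_false, Bool.false_eq_true]
      refine List.pairwise_cons.mpr ⟨fun b hb => ?_, ?_⟩
      · have hbne : b ≠ p := by
          have := (pvFreshMem ps (seen ++ [p]) b hb).2
          simp only [List.mem_append, List.mem_singleton, not_or] at this
          exact this.2
        rw [List.idxOf_cons_self, List.idxOf_cons_ne ps hbne.symm]
        omega
      · refine List.Pairwise.imp_of_mem (fun {a b} ha hb hR => ?_) (ih (seen ++ [p]))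
        have hane : a ≠ p := by
          have := (pvFreshMem ps (seen ++ [p]) a ha).2
          simp only [List.mem_append, List.mem_singleton, not_or] at this
          exact this.2
        have hbne : b ≠ p := by
          have := (pvFreshMem ps (seen ++ [p]) b hb).2
          simp only [List.mem_append, List.mem_singleton, not_or] at this
          exact this.2
        rw [List.idxOf_cons_ne ps hane.symm, List.idxOf_cons_ne ps hbne.symm]
        omega

-- the insert-overwrite fold: lookup = value of the LAST pair for the key in the fold order
lemma pvGetFold (l : List (Int × (Int × Int × Int))) :
    ∀ (d : PySem.Dict (Int × Int × Int) Int) (k : Int × Int × Int),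
    (l.foldl (fun d ip => d.insert ip.2 ip.1) d).get? k =
      (match l.reverse.find? (fun ip => ip.2 == k) with
       | some ip => some ip.1
       | none => d.get? k) := by
  induction l with
  | nil => intro d k; simp
  | cons ip l ih =>
    intro d k
    rw [List.foldl_cons, ih, List.reverse_cons, List.find?_append]
    rcases hf : l.reverse.find? (fun ip => ip.2 == k) with _ | p
    · simp only [hf, Option.none_or]
      by_cases hk : ip.2 = k
      · subst hk; simp [PySem.Dict.get?_insert_self]
      · simp [hk, PySem.Dict.get?_insert_of_ne _ _ (Ne.symm hk) ]
    · simp [hf]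

-- the first enumerate entry whose payload is p carries p's first index
lemma pvFindEnum (ps : List (Int × Int × Int)) :
    ∀ (n : Int) (p : Int × Int × Int), p ∈ ps →
    (PySem.List.enumerate ps n).find? (fun ip => ip.2 == p) = some (n + ps.idxOf p, p) := by
  induction ps with
  | nil => intro n p h; simp at h
  | cons q ps ih =>
    intro n p h
    rw [PySem.List.enumerate_cons]
    by_cases hq : q = p
    · subst hq; simp [List.idxOf_cons_self]
    · rw [List.find?_cons_of_neg (by simp [hq])]
      have hp : p ∈ ps := by rcases List.mem_cons.mp h with h' | h'; exact absurd h'.symm hq; exact h'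
      rw [ih (n + 1) p hp, List.idxOf_cons_ne ps (by simpa using hq)]
      congr 1
      push_cast
      ring_nf

-- letters by enumerate index = pvLettered
lemma pvEnumEqLettered (l : List (Int × Int × Int)) :
    ∀ (n : Nat),
    (PySem.List.enumerate l (n : Int)).map
      (fun ip => (ip.2.1, ip.2.2.1, ip.2.2.2, String.ofList [Char.ofNat (97 + ip.1).toNat]))
      = pvLettered (97 + n) l := by
  induction l with
  | nil => intro n; simp [pvLettered, PySem.List.enumerate_nil]
  | cons p ps ih =>
    intro n
    rw [PySem.List.enumerate_cons]
    simp only [List.map_cons, pvLettered]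
    have h1 : ((97 : Int) + (n : Int)).toNat = 97 + n := by omega
    have h2 : ((n : Int) + 1) = ((n + 1 : Nat) : Int) := by push_cast; ring
    rw [h1, h2, ih (n + 1)]
    have h3 : 97 + (n + 1) = 97 + n + 1 := by omega
    rw [h3]

-- ===== VERDICT (by name: the statement is the Claim_ definition above) =====
theorem get_col_to_var_dict_spec : Claim_equal_get_col_to_var_dict := by
  intro pixels _
  show get_col_to_var_dict pixels = get_col_to_var_dict_alt pixels
  unfold get_col_to_var_dict
  rw [pvLoop pixels [] 97]
  simp only [get_col_to_var_dict_alt]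
  set first : PySem.Dict (Int × Int × Int) Int :=
    ((PySem.List.enumerate pixels 0).reverse).foldl (fun d ip => d.insert ip.2 ip.1) PySem.Dict.empty with hfirst
  -- lookups in `first` are first-occurrence indices
  have hget : ∀ p ∈ pixels, first.get? p = some ((pixels.idxOf p : Nat) : Int) := by
    intro p hp
    rw [hfirst, pvGetFold, List.reverse_reverse, pvFindEnum pixels 0 p hp]
    simp
  have hgetD : ∀ p ∈ pixels, first.getD p 0 = ((pixels.idxOf p : Nat) : Int) := by
    intro p hp
    rw [PySem.Dict.getD_eq_get?_getD, hget p hp]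
    rfl
  -- keys of `first` = the distinct pixels
  have hkeys : ∀ a, a ∈ first.keys ↔ a ∈ pixels := by
    intro a
    rw [hfirst, PySem.Dict.keys_foldl_insert_key]
    have hm : ((PySem.List.enumerate pixels 0).reverse).map (fun ip => ip.2) = pixels.reverse := by
      rw [List.map_reverse, PySem.List.map_snd_enumerate]
    rw [PySem.Dict.keys_empty, hm]
    have : PySem.Set.update ([] : List (Int × Int × Int)) pixels.reverse
        = PySem.Set.ofList pixels.reverse := by
      rw [PySem.Set.ofList_eq_foldl]; rfl
    rw [this, PySem.Set.mem_ofList, List.mem_reverse]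
  have hnodupKeys : first.keys.Nodup := by
    rw [hfirst]
    exact PySem.Dict.nodup_keys_foldl_insert_key _ _ _ _ PySem.Dict.nodup_keys_empty
  -- the sorted keys are exactly pvFresh [] pixels
  have hsorted : PySem.List.sorted first.keys (fun p => first.getD p 0) false = pvFresh [] pixels := by
    apply PySem.List.sorted_eq_of_perm_of_pairwise_lt
    · refine (List.perm_ext_iff_of_nodup (pvFreshNodup pixels []) hnodupKeys).mpr (fun a => ?_)
      rw [hkeys]
      constructor
      · intro h; exact (pvFreshMem pixels [] a h).1
      · intro h; exact pvFreshComplete pixels [] a h (by simp)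
    · refine List.Pairwise.imp_of_mem (fun {a b} ha hb hR => ?_) (pvFreshPairwise pixels [])
      rw [hgetD a (pvFreshMem pixels [] a ha).1, hgetD b (pvFreshMem pixels [] b hb).1]
      exact_mod_cast hR
  rw [hsorted]
  have := pvEnumEqLettered (pvFresh [] pixels) 0
  simpa [pvKeys] using this.symm
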